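-- pv_equiv track=rewrite | github.com/60307390/udst | Sem 2/INFS 1201/Lab 5/ex3.py | stringManipulation
-- ===== SOURCE A (Python) =====
-- def stringManipulation(s):
--     sarcastic_string = ""
--     num_vowels = 0
--
--     if len(s)%2 == 0:
--         middle_char = s[(len(s)//2)-1]+s[len(s)//2]
--     else:
--         middle_char = s[len(s)//2]
--
--     for i in range(len(s)):
--         if i%2==0:
--             sarcastic_string += s[i].upper()
--         else:
--             sarcastic_string += s[i].lower()
--
--         if s[i] in 'aeiou':
--             num_vowels += 1
--     return sarcastic_string, num_vowels, middle_char
-- ===== SOURCE B (Python) =====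
-- def stringManipulation(s):
--     n = len(s)
--     evens = s[0::2].upper()
--     odds = s[1::2].lower()
--     sarcastic = ''.join(a + b for a, b in zip(evens, odds))
--     if n % 2 == 1:
--         sarcastic += evens[-1]
--     if n % 2 == 0:
--         middle = s[n // 2 - 1:n // 2 + 1]
--     else:
--         middle = s[n // 2]
--     num_vowels = sum(1 for c in s if c in 'aeiou')
--     return sarcastic, num_vowels, middle
-- ===== Notes on version B (the rewrite author's own statement) =====
-- stated objective: faster
-- what changed: Replaces A's single per-index loop (parity test on each index, quadratic incremental string concatenation, inline vowel counting) with slice-based construction: uppercase the even-index slice, lowercase the odd-index slice, join the interleaved zip pairs (appending the trailing even char for odd lengths), take the middle via one two-char slice, and count vowels with a separate sum.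
import Mathlib
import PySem

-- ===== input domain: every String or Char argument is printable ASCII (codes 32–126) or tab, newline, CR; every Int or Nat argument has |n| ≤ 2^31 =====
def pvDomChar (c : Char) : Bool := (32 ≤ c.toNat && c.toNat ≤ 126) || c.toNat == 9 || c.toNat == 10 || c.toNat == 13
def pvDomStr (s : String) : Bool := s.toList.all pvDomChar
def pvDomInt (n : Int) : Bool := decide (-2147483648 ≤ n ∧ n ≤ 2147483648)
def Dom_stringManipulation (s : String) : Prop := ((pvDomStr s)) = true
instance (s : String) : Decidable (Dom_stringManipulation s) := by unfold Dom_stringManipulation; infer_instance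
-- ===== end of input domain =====

-- B builds the sarcastic string from the even/odd slices (zip + join) instead of A's per-index
-- loop, takes the even-length middle via one two-char slice, and counts vowels in a separate sum.

-- ===== PORT A =====
def stringManipulation (s : String) : String × Int × String :=
  let cs := s.toList
  let n : Int := (cs.length : Int)
  let middleChar : List Char :=
    if PySem.Int.mod n 2 = 0 then
      [PySem.List.pyGetD cs (PySem.Int.floordiv n 2 - 1) ' '] ++
        [PySem.List.pyGetD cs (PySem.Int.floordiv n 2) ' ']
    else
      [PySem.List.pyGetD cs (PySem.Int.floordiv n 2) ' ']
  let loop :=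
    (PySem.List.pyRange 0 n).foldl
      (fun (st : List Char × Int) i =>
        (if PySem.Int.mod i 2 = 0 then
            st.1 ++ PySem.Chars.upper [PySem.List.pyGetD cs i ' ']
          else
            st.1 ++ PySem.Chars.lower [PySem.List.pyGetD cs i ' '],
         if PySem.Chars.isIn [PySem.List.pyGetD cs i ' '] ['a','e','i','o','u'] then st.2 + 1 else st.2))
      ([], 0)
  (String.ofList loop.1, loop.2, String.ofList middleChar)

-- ===== PORT B =====
def stringManipulation_alt (s : String) : String × Int × String :=
  let cs := s.toList
  let n : Int := (cs.length : Int)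
  let evens := PySem.Chars.upper ((PySem.List.slice? cs (some 0) none 2).getD [])
  let odds := PySem.Chars.lower ((PySem.List.slice? cs (some 1) none 2).getD [])
  let sar0 := PySem.Chars.join [] ((evens.zip odds).map (fun p => [p.1, p.2]))
  let sar := if PySem.Int.mod n 2 = 1 then sar0 ++ (PySem.List.pyGet? evens (-1)).elim [] (fun c => [c]) else sar0
  let middle : List Char :=
    if PySem.Int.mod n 2 = 0 then
      PySem.List.slice cs (some (PySem.Int.floordiv n 2 - 1)) (some (PySem.Int.floordiv n 2 + 1))
    else
      [PySem.List.pyGetD cs (PySem.Int.floordiv n 2) ' ']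
  let numVowels : Int :=
    (cs.map (fun c => if PySem.Chars.isIn [c] ['a','e','i','o','u'] then (1 : Int) else 0)).sum
  (String.ofList sar, numVowels, String.ofList middle)

-- ===== PRECONDITION & SPEC =====
-- Pre_ excludes only the empty string, on which A raises IndexError computing the middle character.
def Pre_stringManipulation (s : String) : Prop := s ≠ ""
instance (s : String) : Decidable (Pre_stringManipulation s) := by unfold Pre_stringManipulation; infer_instance
def pvWitness_stringManipulation : String := "abc"

def Spec_stringManipulation (s : String) (out : String × Int × String) : Prop := out = stringManipulation_alt s
instance (s : String) (out : String × Int × String) : Decidable (Spec_stringManipulation s out) := by unfold Spec_stringManipulation; infer_instance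

-- ===== CLAIM (what is proved, stated in full; the proofs are below) =====
def Claim_equal_stringManipulation : Prop := ∀ (s : String), Dom_stringManipulation s → Pre_stringManipulation s → Spec_stringManipulation s (stringManipulation s)


-- ===== LEMMAS AND PROOFS =====

def pvEvens : List Char → List Char
  | [] => []
  | [a] => [a]
  | a :: _ :: t => a :: pvEvens t
def pvOdds : List Char → List Char
  | [] => []
  | [_] => []
  | _ :: b :: t => b :: pvOdds t

lemma fmE : ∀ (cs : List Char), List.filterMap (fun k => cs[2*k]?) (List.range ((cs.length+1)/2)) = pvEvens cs := by
  intro cs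
  induction cs using pvEvens.induct with
  | case1 => simp [pvEvens]
  | case2 a => simp [pvEvens]
  | case3 a b t ih =>
      have h : (a :: b :: t).length = t.length + 2 := by simp
      rw [h]
      have h2 : (t.length + 2 + 1)/2 = (t.length+1)/2 + 1 := by omega
      rw [h2, List.range_succ_eq_map]
      simp only [List.filterMap_cons, List.filterMap_map]
      simp [pvEvens, Function.comp, Nat.mul_add, ← ih]

lemma fmO : ∀ (cs : List Char), List.filterMap (fun k => cs[2*k+1]?) (List.range (cs.length/2)) = pvOdds cs := by
  intro cs
  induction cs using pvOdds.induct with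
  | case1 => simp [pvOdds]
  | case2 a => simp [pvOdds]
  | case3 a b t ih =>
      have h : (a :: b :: t).length = t.length + 2 := by simp
      rw [h]
      have h2 : (t.length + 2)/2 = t.length/2 + 1 := by omega
      rw [h2, List.range_succ_eq_map]
      simp only [List.filterMap_cons, List.filterMap_map]
      simp [pvOdds, Function.comp, Nat.mul_add, ← ih]

lemma slice2E (cs : List Char) : PySem.List.slice? cs (some 0) none 2 = some (pvEvens cs) := by
  simp only [PySem.List.slice?, PySem.List.sliceIndices]
  norm_num
  rw [← fmE cs]
  congr 2
  split_ifs with h <;> omega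

lemma slice2O (cs : List Char) : PySem.List.slice? cs (some 1) none 2 = some (pvOdds cs) := by
  cases cs with
  | nil => decide
  | cons a t =>
    simp only [PySem.List.slice?, PySem.List.sliceIndices]
    norm_num
    rw [← fmO (a :: t)]
    congr 1
    · funext k
      congr 1
      omega
    · congr 1
      simp only [List.length_cons]
      split_ifs with h <;> omega

-- the alternating-case string, tracking whether the current index is even
def pvAlt (b : Bool) : List Char → List Char
  | [] => []
  | c :: t =>
      (if b then PySem.Chars.upper [c] else PySem.Chars.lower [c]) ++ pvAlt (!b) t

lemma pvEvens_length (cs : List Char) : (pvEvens cs).length = (cs.length + 1) / 2 := by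
  induction cs using pvEvens.induct with
  | case1 => simp [pvEvens]
  | case2 a => simp [pvEvens]
  | case3 a b t ih => simp [pvEvens, ih]; omega

lemma pvEvens_ne_nil (cs : List Char) (h : cs ≠ []) : pvEvens cs ≠ [] := by
  have := pvEvens_length cs
  have hl : 0 < cs.length := List.length_pos_iff.mpr h
  intro hc
  rw [hc] at this
  simp at this
  omega

lemma pyGet_neg_one_cons (x : Char) (l : List Char) (h : l ≠ []) :
    PySem.List.pyGet? (x :: l) (-1) = PySem.List.pyGet? l (-1) := by
  have hl : 0 < l.length := List.length_pos_iff.mpr h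
  simp [PySem.List.pyGet?, PySem.List.pyIdx?]
  rw [if_pos (by omega)]
  show some ((x :: l)[l.length]'(by simp)) = l[l.length - 1]?
  rw [List.getElem?_eq_getElem (by omega : l.length - 1 < l.length)]
  simp [List.getElem_cons, Nat.pos_iff_ne_zero.mp hl]

lemma B_sar (cs : List Char) :
    (let evens := PySem.Chars.upper (pvEvens cs)
     let odds := PySem.Chars.lower (pvOdds cs)
     let sar0 := PySem.Chars.join [] ((evens.zip odds).map (fun p => [p.1, p.2]))
     if PySem.Int.mod ((cs.length : Int)) 2 = 1 then
       sar0 ++ (PySem.List.pyGet? evens (-1)).elim [] (fun c => [c])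
     else sar0) = pvAlt true cs := by
  induction cs using pvEvens.induct with
  | case1 => decide
  | case2 a =>
      simp [pvEvens, pvOdds, pvAlt, PySem.Chars.upper, PySem.Chars.lower, PySem.Chars.join_nil,
        PySem.List.pyGet?, PySem.List.pyIdx?]
  | case3 a b t ih =>
      simp only [pvEvens, pvOdds, pvAlt]
      simp only [PySem.Chars.upper, PySem.Chars.lower, List.map_cons] at *
      simp only [List.zip_cons_cons, List.map_cons]
      have hjoin : ∀ (x : List Char) (xs : List (List Char)),
          PySem.Chars.join [] (x :: xs) = x ++ PySem.Chars.join [] xs := by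
        intro x xs
        cases xs with
        | nil => simp [PySem.Chars.join_singleton, PySem.Chars.join_nil]
        | cons y ys => rw [PySem.Chars.join_cons_cons]; simp
      rw [hjoin]
      have hmod : PySem.Int.mod (((a :: b :: t).length : Int)) 2 = PySem.Int.mod ((t.length : Int)) 2 := by
        have h1 : PySem.Int.mod (((a :: b :: t).length : Int)) 2 = (((a :: b :: t).length % 2 : Nat) : Int) := by
          exact_mod_cast PySem.Int.mod_natCast (a :: b :: t).length 2
        have h2 : PySem.Int.mod ((t.length : Int)) 2 = ((t.length % 2 : Nat) : Int) := by
          exact_mod_cast PySem.Int.mod_natCast t.length 2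
        rw [h1, h2]
        congr 1
        simp only [List.length_cons]
        omega
      rw [hmod]
      by_cases hp : PySem.Int.mod ((t.length : Int)) 2 = 1
      · rw [if_pos hp] at *
        have ht : t ≠ [] := by
          intro hc; rw [hc] at hp; simp [PySem.Int.mod] at hp
        have hE : (pvEvens t).map PySem.Chars.upperChar ≠ [] := by
          simp [List.map_eq_nil_iff]
          exact pvEvens_ne_nil t ht
        rw [pyGet_neg_one_cons _ _ hE]
        simp only [List.cons_append, List.nil_append] at *
        rw [ih]
        simp
      · rw [if_neg hp] at *
        simp only [List.cons_append, List.nil_append] at *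
        rw [ih]
        simp

lemma pyRange_nil (k len : Nat) (h : len ≤ k) : PySem.List.pyRange (k : Int) (len : Int) = [] := by
  simp only [PySem.List.pyRange]
  rw [if_neg (by norm_num)]
  rw [if_pos (by norm_num)]
  rw [if_neg (by exact_mod_cast Nat.not_lt.mpr h)]
  simp

lemma flat_gen (cs : List Char) : ∀ (full : List Char) (k : Nat), full.drop k = cs →
    (PySem.List.pyRange (k : Int) ((full.length : Int))).flatMap
      (fun i => if PySem.Int.mod i 2 = 0 then PySem.Chars.upper [PySem.List.pyGetD full i ' ']
                else PySem.Chars.lower [PySem.List.pyGetD full i ' ']) =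
    pvAlt (decide (k % 2 = 0)) cs := by
  induction cs with
  | nil =>
      intro full k h
      have hk : full.length ≤ k := by
        by_contra hc
        have := congrArg List.length h
        simp [List.length_drop] at this
        omega
      rw [pyRange_nil k full.length hk]
      simp [pvAlt]
  | cons c t ih =>
      intro full k h
      have hk : k < full.length := by
        by_contra hc
        rw [List.drop_eq_nil_of_le (by omega)] at h
        simp at h
      have hget : full[k] = c := by
        have h0 : (full.drop k)[0]'(by simp [h]) = c := by simp [h]
        simpa using h0
      have ht : full.drop (k + 1) = t := by
        have := congrArg List.tail h
        simpa [← List.tail_drop] using this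
      rw [PySem.List.pyRange_one_cons (by exact_mod_cast hk)]
      rw [List.flatMap_cons]
      have hcast : ((k : Int)) + 1 = ((k + 1 : Nat) : Int) := by push_cast; ring
      rw [hcast, ih full (k + 1) ht]
      have hmod : PySem.Int.mod ((k : Int)) 2 = ((k % 2 : Nat) : Int) := by
        exact_mod_cast PySem.Int.mod_natCast k 2
      have hgetD : PySem.List.pyGetD full ((k : Int)) ' ' = c := by
        rw [PySem.List.pyGetD_eq_getElem full ' ' (by positivity) (by exact_mod_cast hk)]
        simpa using hget
      have hflip : (decide ((k + 1) % 2 = 0)) = !(decide (k % 2 = 0)) := by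
        rcases Nat.mod_two_eq_zero_or_one k with hp | hp <;> simp [Nat.add_mod, hp]
      rw [hflip, hmod, hgetD]
      rcases Nat.mod_two_eq_zero_or_one k with hp | hp <;> simp [pvAlt, hp]

-- ===== VERDICT (by name: the statement is the Claim_ definition above) =====
theorem stringManipulation_spec : Claim_equal_stringManipulation := by
  intro s _ hpre
  show stringManipulation s = stringManipulation_alt s
  unfold stringManipulation stringManipulation_alt
  have hcs : s.toList ≠ [] := by
    intro hc
    exact hpre (by simpa using congrArg String.ofList hc)
  dsimp only
  have hp := PySem.List.foldl_prod_mk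
    (fun (a : List Char) (i : Int) =>
      if PySem.Int.mod i 2 = 0 then a ++ PySem.Chars.upper [PySem.List.pyGetD s.toList i ' ']
      else a ++ PySem.Chars.lower [PySem.List.pyGetD s.toList i ' '])
    (fun (b : Int) (i : Int) =>
      if PySem.Chars.isIn [PySem.List.pyGetD s.toList i ' '] ['a','e','i','o','u'] then b + 1 else b)
    (PySem.List.pyRange 0 ((s.toList.length : Int))) [] 0
  rw [hp]
  simp only [Prod.mk.injEq]
  refine ⟨?_, ?_, ?_⟩
  · -- sarcastic string
    congr 1
    have hf : (fun (acc : List Char) (i : Int) =>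
        if PySem.Int.mod i 2 = 0 then acc ++ PySem.Chars.upper [PySem.List.pyGetD s.toList i ' ']
        else acc ++ PySem.Chars.lower [PySem.List.pyGetD s.toList i ' ']) =
        (fun (acc : List Char) (i : Int) => acc ++
          (if PySem.Int.mod i 2 = 0 then PySem.Chars.upper [PySem.List.pyGetD s.toList i ' ']
           else PySem.Chars.lower [PySem.List.pyGetD s.toList i ' '])) := by
      funext acc i
      split_ifs <;> rfl
    rw [hf, PySem.List.foldl_append_eq_flatMap, List.nil_append]
    have hA := flat_gen s.toList s.toList 0 rfl
    simp only [Nat.cast_zero] at hA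
    rw [show (decide True) = true from rfl] at hA
    rw [hA]
    rw [slice2E s.toList, slice2O s.toList]
    have hB := B_sar s.toList
    dsimp only at hB ⊢
    rw [← hB]
    simp only [Option.getD_some]
  · -- vowel count
    have hV := PySem.List.foldl_pyRange_pyGetD s.toList ' '
      (fun (acc : Int) (c : Char) => if PySem.Chars.isIn [c] ['a','e','i','o','u'] then acc + 1 else acc)
      0 (a := 0) (by norm_num)
    simp only [PySem.List.len] at hV
    rw [hV]
    simp only [Int.toNat_zero, List.drop_zero]
    rw [PySem.List.foldl_count_if]
    rw [PySem.List.sum_map_ite_one_zero]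
    simp
  · -- middle characters
    congr 1
    have hfd : PySem.Int.floordiv ((s.toList.length : Int)) 2 = ((s.toList.length / 2 : Nat) : Int) := by
      exact_mod_cast PySem.Int.floordiv_natCast s.toList.length 2
    by_cases hm : PySem.Int.mod ((s.toList.length : Int)) 2 = 0
    · rw [if_pos hm, if_pos hm]
      have hmodn : s.toList.length % 2 = 0 := by
        have h1 : PySem.Int.mod ((s.toList.length : Int)) 2 = ((s.toList.length % 2 : Nat) : Int) := by
          exact_mod_cast PySem.Int.mod_natCast s.toList.length 2
        rw [h1] at hm
        exact_mod_cast hm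
      have hlen : 0 < s.toList.length := List.length_pos_iff.mpr hcs
      have hm1 : 1 ≤ s.toList.length / 2 := by omega
      have hm2 : s.toList.length / 2 < s.toList.length := by omega
      rw [hfd]
      have hc1 : ((s.toList.length / 2 : Nat) : Int) - 1 = ((s.toList.length / 2 - 1 : Nat) : Int) := by omega
      have hc2 : ((s.toList.length / 2 : Nat) : Int) + 1 = ((s.toList.length / 2 + 1 : Nat) : Int) := by omega
      rw [hc1, hc2, PySem.List.slice_natCast]
      rw [PySem.List.pyGetD_eq_getElem s.toList ' ' (by positivity) (by exact_mod_cast (by omega : s.toList.length / 2 - 1 < s.toList.length))]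
      rw [PySem.List.pyGetD_eq_getElem s.toList ' ' (by positivity) (by exact_mod_cast hm2)]
      rw [List.drop_eq_getElem_cons (by omega)]
      rw [show s.toList.length / 2 - 1 + 1 = s.toList.length / 2 by omega]
      rw [List.drop_eq_getElem_cons (by omega)]
      have h2t : s.toList.length / 2 + 1 - (s.toList.length / 2 - 1) = 2 := by omega
      rw [h2t]
      simp only [List.cons_append, List.nil_append, List.take_succ_cons, List.take_zero,
        Int.toNat_natCast]
    · rw [if_neg hm, if_neg hm]
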